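-- pv_equiv track=rewrite | github.com/paiml/depyler | examples/hard_sec_secret_share.py | xor_split
-- ===== SOURCE A (Python) =====
-- from typing import List, Tuple
--
-- def xor_split(secret: List[int], n: int, seed: int) -> List[List[int]]:
--     shares: List[List[int]] = []
--     val: int = seed
--     for i in range(n - 1):
--         share: List[int] = []
--         for j in range(len(secret)):
--             val = ((val * 6364136223846793005) + 1) & 0xFFFFFFFF
--             share.append(val & 0xFF)
--         shares.append(share)
--     last: List[int] = []
--     for j in range(len(secret)):
--         xv: int = secret[j]
--         for i in range(n - 1):
--             xv = xv ^ shares[i][j]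
--         last.append(xv)
--     shares.append(last)
--     return shares
-- ===== SOURCE B (Python) =====
-- def xor_split(secret, n, seed):
--     shares = []
--     acc = list(secret)
--     val = seed
--     for i in range(n - 1):
--         share = []
--         for j in range(len(secret)):
--             val = ((val * 6364136223846793005) + 1) & 0xFFFFFFFF
--             b = val & 0xFF
--             share.append(b)
--             acc[j] ^= b
--         shares.append(share)
--     shares.append(acc)
--     return shares
-- ===== Notes on version B (the rewrite author's own statement) =====
-- stated objective: simpler
-- what changed: B fuses share generation and last-share computation into one pass: it XORs each generated byte into an accumulator initialized to the secret, so A's second nested XOR/indexing pass disappears.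
import Mathlib
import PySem

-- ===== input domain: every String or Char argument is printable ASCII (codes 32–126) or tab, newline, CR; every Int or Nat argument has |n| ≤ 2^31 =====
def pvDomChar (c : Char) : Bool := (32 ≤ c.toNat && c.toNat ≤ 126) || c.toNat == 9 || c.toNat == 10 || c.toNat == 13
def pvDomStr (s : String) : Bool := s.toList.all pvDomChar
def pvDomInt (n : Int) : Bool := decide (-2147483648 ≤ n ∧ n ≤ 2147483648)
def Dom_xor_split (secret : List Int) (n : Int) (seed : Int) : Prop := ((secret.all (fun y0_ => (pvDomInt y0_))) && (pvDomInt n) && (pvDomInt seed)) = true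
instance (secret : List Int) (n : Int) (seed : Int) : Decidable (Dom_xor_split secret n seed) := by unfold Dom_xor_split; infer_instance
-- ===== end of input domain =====

-- B fuses share generation and last-share computation into one pass (accumulator
-- XOR-updated while generating); return values are provably identical to A's.

-- ===== PORT A =====
-- inner loop of A: generate `m` PRNG bytes, threading `val`
def pvGenA : Int → Nat → Int × List Int
  | val, 0 => (val, [])
  | val, m + 1 =>
    let v := PySem.Int.band (val * 6364136223846793005 + 1) 0xFFFFFFFF
    let r := pvGenA v m
    (r.1, PySem.Int.band v 0xFF :: r.2)

-- outer loop of A: `n-1` shares, threading `val`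
def pvSharesA (len : Nat) : Int → Nat → Int × List (List Int)
  | val, 0 => (val, [])
  | val, k + 1 =>
    let g := pvGenA val len
    let r := pvSharesA len g.1 k
    (r.1, g.2 :: r.2)

def xor_split (secret : List Int) (n : Int) (seed : Int) : List (List Int) :=
  let shares := (pvSharesA secret.length seed (n - 1).toNat).2
  let last := (PySem.List.pyRange 0 (secret.length : Int) 1).map (fun j =>
    shares.foldl (fun xv sh => PySem.Int.bxor xv (PySem.List.pyGetD sh j 0))
      (PySem.List.pyGetD secret j 0))
  shares ++ [last]

-- ===== PORT B =====
-- one round of B: walk the accumulator, producing the new val, the share and the updated accumulator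
def pvRoundB : Int → List Int → Int × List Int × List Int
  | val, [] => (val, [], [])
  | val, a :: rest =>
    let v := PySem.Int.band (val * 6364136223846793005 + 1) 0xFFFFFFFF
    let b := PySem.Int.band v 0xFF
    let r := pvRoundB v rest
    (r.1, b :: r.2.1, PySem.Int.bxor a b :: r.2.2)

def pvLoopB : Int → List Int → Nat → List (List Int) × List Int
  | _, acc, 0 => ([], acc)
  | val, acc, k + 1 =>
    let r := pvRoundB val acc
    let s := pvLoopB r.1 r.2.2 k
    (r.2.1 :: s.1, s.2)

def xor_split_alt (secret : List Int) (n : Int) (seed : Int) : List (List Int) :=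
  let r := pvLoopB seed secret (n - 1).toNat
  r.1 ++ [r.2]

-- ===== PRECONDITION & SPEC =====
def Spec_xor_split (secret : List Int) (n : Int) (seed : Int) (out : List (List Int)) : Prop := out = xor_split_alt secret n seed
instance (secret : List Int) (n : Int) (seed : Int) (out : List (List Int)) : Decidable (Spec_xor_split secret n seed out) := by unfold Spec_xor_split; infer_instance

-- ===== CLAIM (what is proved, stated in full; the proofs are below) =====
def Claim_equal_xor_split : Prop := ∀ (secret : List Int) (n : Int) (seed : Int), Dom_xor_split secret n seed → Spec_xor_split secret n seed (xor_split secret n seed)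

-- ===== LEMMAS AND PROOFS =====

theorem pvGenA_len (val : Int) (m : Nat) : (pvGenA val m).2.length = m := by
  induction m generalizing val with
  | zero => simp [pvGenA]
  | succ m ih => simp [pvGenA, ih]

-- pvRoundB equals pvGenA on the accumulator's length, zipping the bytes into the accumulator
theorem pvRoundB_eq (val : Int) (acc : List Int) :
    pvRoundB val acc =
      ((pvGenA val acc.length).1, (pvGenA val acc.length).2,
        List.zipWith (fun a b => PySem.Int.bxor a b) acc (pvGenA val acc.length).2) := by
  induction acc generalizing val with
  | nil => simp [pvRoundB, pvGenA]
  | cons a rest ih =>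
    simp only [pvRoundB, pvGenA, List.length_cons]
    rw [ih]
    simp

theorem zipWith_len (acc sh : List Int) (h : sh.length = acc.length) :
    (List.zipWith (fun a b => PySem.Int.bxor a b) acc sh).length = acc.length := by
  simp [List.length_zipWith, h]

-- the loop of B computes A's shares and folds the XOR-zip over them
theorem pvLoopB_eq (k : Nat) (val : Int) (acc : List Int) :
    pvLoopB val acc k =
      ((pvSharesA acc.length val k).2,
        (pvSharesA acc.length val k).2.foldl
          (fun ac sh => List.zipWith (fun a b => PySem.Int.bxor a b) ac sh) acc) := by
  induction k generalizing val acc with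
  | zero => simp [pvLoopB, pvSharesA]
  | succ k ih =>
    simp only [pvLoopB, pvSharesA]
    rw [pvRoundB_eq]
    have hlen := zipWith_len acc (pvGenA val acc.length).2 (pvGenA_len _ _)
    rw [ih]
    simp [hlen, List.foldl_cons]

theorem pyGetD_zipWith (acc sh : List Int) (j : Int) (h : sh.length = acc.length)
    (h0 : 0 ≤ j) (hj : j < (acc.length : Int)) :
    PySem.List.pyGetD (List.zipWith (fun a b => PySem.Int.bxor a b) acc sh) j 0 =
      PySem.Int.bxor (PySem.List.pyGetD acc j 0) (PySem.List.pyGetD sh j 0) := by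
  rw [PySem.List.pyGetD_eq_getElem _ 0 h0 (by simp [List.length_zipWith, h]; omega),
    PySem.List.pyGetD_eq_getElem acc 0 h0 hj, PySem.List.pyGetD_eq_getElem sh 0 h0 (by omega)]
  simp [List.getElem_zipWith]

-- A's indexed last-share pass equals the fold of XOR-zips
theorem lastA_eq_fold (shares : List (List Int)) (secret : List Int)
    (hlen : ∀ sh ∈ shares, sh.length = secret.length) :
    (PySem.List.pyRange 0 (secret.length : Int) 1).map (fun j =>
        shares.foldl (fun xv sh => PySem.Int.bxor xv (PySem.List.pyGetD sh j 0))
          (PySem.List.pyGetD secret j 0)) =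
      shares.foldl (fun ac sh => List.zipWith (fun a b => PySem.Int.bxor a b) ac sh) secret := by
  induction shares generalizing secret with
  | nil => simpa using PySem.List.map_pyGetD_pyRange_zero' secret 0
  | cons sh rest ih =>
    have hsh : sh.length = secret.length := hlen sh (by simp)
    have hzl : (List.zipWith (fun a b => PySem.Int.bxor a b) secret sh).length =
        secret.length := zipWith_len _ _ hsh
    have hlen2 : ∀ s ∈ rest, s.length =
        (List.zipWith (fun a b => PySem.Int.bxor a b) secret sh).length := by
      intro s hs; rw [hzl]; exact hlen s (by simp [hs])
    simp only [List.foldl_cons]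
    rw [← ih (List.zipWith (fun a b => PySem.Int.bxor a b) secret sh) hlen2, hzl]
    apply List.map_congr_left
    intro j hj
    have hj' := (PySem.List.mem_pyRange_one).mp hj
    rw [pyGetD_zipWith secret sh j hsh hj'.1 hj'.2]

theorem sharesA_len (len : Nat) (val : Int) (k : Nat) :
    ∀ sh ∈ (pvSharesA len val k).2, sh.length = len := by
  induction k generalizing val with
  | zero => simp [pvSharesA]
  | succ k ih =>
    intro sh hsh
    simp only [pvSharesA, List.mem_cons] at hsh
    rcases hsh with h | h
    · subst h; exact pvGenA_len _ _
    · exact ih _ sh h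

-- ===== VERDICT (by name: the statement is the Claim_ definition above) =====
theorem xor_split_spec : Claim_equal_xor_split := by
  intro secret n seed _
  unfold Spec_xor_split xor_split xor_split_alt
  rw [pvLoopB_eq]
  simp only
  rw [lastA_eq_fold _ _ (sharesA_len secret.length seed (n - 1).toNat)]
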